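-- pv_equiv track=rewrite | github.com/wsher0901/Weekly_Meeting_Dashboard_Visualization | Functions/Visualization/New_Allele_Visualization.py | check_mut_type
-- ===== SOURCE A (Python) =====
-- def check_mut_type(data):
--     mut_type = set()
--     for i in data:
--         mut_type.add(i[0])
--     if len(mut_type) == 1:
--         mut = list(mut_type)[0]
--         if mut == 'P':
--             return 'Substitution'
--         elif mut == 'D':
--             return 'Deletion'
--         else:
--             return 'Insertion'
--     else:
--         return 'Mixed'
-- ===== SOURCE B (Python) =====
-- def check_mut_type(data):
--     # One pass with an early exit: remember the first entry's first char,
--     # return 'Mixed' as soon as a different first char is seen.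
--     it = iter(data)
--     first = next(it, None)
--     if first is None:
--         return 'Mixed'
--     ref = first[0]
--     for s in it:
--         if s[0] != ref:
--             return 'Mixed'
--     if ref == 'P':
--         return 'Substitution'
--     if ref == 'D':
--         return 'Deletion'
--     return 'Insertion'
-- ===== Notes on version B (the rewrite author's own statement) =====
-- stated objective: simpler
-- what changed: Replaces the intermediate set of all distinct first characters with a single pass that keeps the first entry's first char and early-exits with 'Mixed' on the first differing one.
import Mathlib
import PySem

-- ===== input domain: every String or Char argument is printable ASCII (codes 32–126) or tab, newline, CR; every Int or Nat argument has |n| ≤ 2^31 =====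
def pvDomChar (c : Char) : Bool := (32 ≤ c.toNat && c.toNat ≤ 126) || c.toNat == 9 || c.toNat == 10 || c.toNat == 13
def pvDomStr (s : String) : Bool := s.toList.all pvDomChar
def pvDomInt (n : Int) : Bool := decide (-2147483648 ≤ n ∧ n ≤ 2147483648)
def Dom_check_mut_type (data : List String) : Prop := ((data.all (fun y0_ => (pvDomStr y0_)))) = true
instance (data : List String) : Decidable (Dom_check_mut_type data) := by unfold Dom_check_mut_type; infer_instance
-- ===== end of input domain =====

-- B replaces A's set of distinct first characters by a single pass tracking the first
-- entry's first char with an early 'Mixed' exit (objective: simpler).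


-- ===== PORT A =====
-- i[0]; Python raises IndexError on "", excluded by Pre_: the '?' default is never read there.
def pvFirstChar (s : String) : Char := (PySem.Str.pyGet? s 0).getD '?'

def check_mut_type (data : List String) : String :=
  -- mut_type = set(); for i in data: mut_type.add(i[0])
  let mut_type : PySem.Set Char :=
    data.foldl (fun s i => PySem.Set.add s (pvFirstChar i)) PySem.Set.empty
  if PySem.Set.len mut_type = 1 then
    -- list(mut_type)[0]: the set has exactly one element, so order-independent
    let m := mut_type.headD '?'
    if m = 'P' then "Substitution"
    else if m = 'D' then "Deletion"
    else "Insertion"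
  else "Mixed"

-- ===== PORT B =====
def altClassify (c : Char) : String :=
  if c = 'P' then "Substitution"
  else if c = 'D' then "Deletion"
  else "Insertion"

-- the 'for s in it' loop of Source B: early exit on a differing first char
def altLoop (ref : Char) : List String → String
  | [] => altClassify ref
  | s :: rest => if pvFirstChar s ≠ ref then "Mixed" else altLoop ref rest

def check_mut_type_alt (data : List String) : String :=
  match data with
  | [] => "Mixed"
  | first :: rest => altLoop (pvFirstChar first) rest

-- ===== PRECONDITION & SPEC =====
-- Pre_ excludes lists containing an empty string, on which A raises IndexError at i[0].
def Pre_check_mut_type (data : List String) : Prop := ∀ s ∈ data, s ≠ ""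
instance (data : List String) : Decidable (Pre_check_mut_type data) := by
  unfold Pre_check_mut_type; infer_instance

def pvWitness_check_mut_type : List String := ["P12", "P7"]

def Spec_check_mut_type (data : List String) (out : String) : Prop := out = check_mut_type_alt data
instance (data : List String) (out : String) : Decidable (Spec_check_mut_type data out) := by unfold Spec_check_mut_type; infer_instance

-- ===== CLAIM (what is proved, stated in full; the proofs are below) =====
def Claim_equal_check_mut_type : Prop := ∀ (data : List String), Dom_check_mut_type data → Pre_check_mut_type data → Spec_check_mut_type data (check_mut_type data)

-- ===== LEMMAS AND PROOFS =====

-- If every later first char equals c, the set stays [c].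
lemma foldl_add_all_eq (cs : List Char) (c : Char) (h : ∀ x ∈ cs, x = c) :
    cs.foldl PySem.Set.add [c] = [c] := by
  induction cs with
  | nil => rfl
  | cons y ys ih =>
    have hy : y = c := h y (List.mem_cons_self ..)
    simp [hy, PySem.Set.add, PySem.Set.contains]
    exact ih (fun x hx => h x (List.mem_cons_of_mem _ hx))

lemma altLoop_all_eq (rest : List String) (c : Char) (h : ∀ s ∈ rest, pvFirstChar s = c) :
    altLoop c rest = altClassify c := by
  induction rest with
  | nil => rfl
  | cons y ys ih =>
    simp [altLoop, h y (List.mem_cons_self ..)]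
    exact ih (fun s hs => h s (List.mem_cons_of_mem _ hs))

lemma altLoop_mixed (rest : List String) (c : Char) (h : ∃ s ∈ rest, pvFirstChar s ≠ c) :
    altLoop c rest = "Mixed" := by
  induction rest with
  | nil => simp at h
  | cons y ys ih =>
    by_cases hy : pvFirstChar y = c
    · simp [altLoop, hy]
      apply ih
      rcases h with ⟨s, hs, hne⟩
      rcases List.mem_cons.mp hs with rfl | hs'
      · exact absurd hy hne
      · exact ⟨s, hs', hne⟩
    · simp [altLoop, hy]

-- A nodup list containing two distinct elements does not have length 1.
lemma len_ne_one_of_two_mem {α : Type} (l : List α) (a b : α)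
    (ha : a ∈ l) (hb : b ∈ l) (hne : a ≠ b) : l.length ≠ 1 := by
  intro h1
  match l, h1 with
  | [x], _ =>
    simp at ha hb
    exact hne (ha.trans hb.symm)

-- The set A builds is set(list of first chars).
lemma mut_type_eq_ofList (data : List String) :
    data.foldl (fun s i => PySem.Set.add s (pvFirstChar i)) PySem.Set.empty
      = PySem.Set.ofList (data.map pvFirstChar) := by
  rw [PySem.Set.ofList_eq_foldl, ← List.foldl_map]
  rfl

-- ===== VERDICT (by name: the statement is the Claim_ definition above) =====
theorem check_mut_type_spec : Claim_equal_check_mut_type := by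
  intro data _ _
  unfold Spec_check_mut_type check_mut_type
  rw [mut_type_eq_ofList]
  match data with
  | [] => rfl
  | first :: rest =>
    set c := pvFirstChar first with hc
    by_cases hall : ∀ s ∈ rest, pvFirstChar s = c
    · have hset : PySem.Set.ofList ((first :: rest).map pvFirstChar) = [c] := by
        rw [PySem.Set.ofList_eq_foldl]
        simp only [List.map_cons, List.foldl_cons]
        rw [← hc]
        show List.foldl PySem.Set.add [c] _ = [c]
        exact foldl_add_all_eq _ c (by
          intro x hx
          rcases List.mem_map.mp hx with ⟨s, hs, rfl⟩
          exact hall s hs)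
      rw [hset]
      show _ = check_mut_type_alt (first :: rest)
      simp only [check_mut_type_alt, ← hc, altLoop_all_eq rest c hall]
      simp [PySem.Set.len, altClassify]
    · push Not at hall
      rcases hall with ⟨s, hs, hne⟩
      have hlen : (PySem.Set.ofList ((first :: rest).map pvFirstChar)).length ≠ 1 := by
        apply len_ne_one_of_two_mem _ (pvFirstChar s) c
        · exact (PySem.Set.mem_ofList _ _).mpr (List.mem_map.mpr ⟨s, List.mem_cons_of_mem _ hs, rfl⟩)
        · exact (PySem.Set.mem_ofList _ _).mpr (List.mem_map.mpr ⟨first, List.mem_cons_self .., hc.symm ▸ rfl⟩)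
        · exact hne
      have hq : ¬ (PySem.Set.len (PySem.Set.ofList ((first :: rest).map pvFirstChar)) = 1) := by
        simp only [PySem.Set.len]
        exact_mod_cast hlen
      rw [if_neg hq]
      simp only [check_mut_type_alt, ← hc, altLoop_mixed rest c ⟨s, hs, hne⟩]
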